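-- pv_equiv track=rewrite | github.com/priyamayur/NamedEntityRecognition | ExtractData.py | get_NER_masked_negative_data
-- ===== SOURCE A (Python) =====
-- def get_NER_masked_negative_data(dataset, nerPosition):
--   training_data = []
--   nonNer = 'O'
--   for ind_d, data in enumerate(dataset):
--     nerSent = nerPosition[ind_d]
--     for ner in nerSent:
--       complete_sentences = []
--       numberOfNer = ner[0]
--       wordPosition = ner[1] + numberOfNer
--       for ind, word in enumerate(data):
--         if (word[1] == nonNer and ind >= wordPosition and ind < (wordPosition + numberOfNer)):
--           complete_sentences.append("<MASK>")
--         else: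
--           complete_sentences.append(word[0])
--       training_data.append([complete_sentences,0])
--   return training_data
-- ===== SOURCE B (Python) =====
-- def get_NER_masked_negative_data(dataset, nerPosition):
--     training_data = []
--     for data, ners in zip(dataset, nerPosition):
--         words = [w[0] for w in data]
--         for numberOfNer, pos in ners:
--             wordPosition = pos + numberOfNer
--             sent = list(words)
--             for i in range(max(wordPosition, 0), min(wordPosition + numberOfNer, len(data))):
--                 if data[i][1] == 'O':
--                     sent[i] = "<MASK>"
--             training_data.append([sent, 0])
--     return training_data
-- ===== Notes on version B (the rewrite author's own statement) =====
-- stated objective: simpler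
-- what changed: B builds the base token list once per sentence and, per ner, copies it and overwrites only the clamped index window [wordPosition, wordPosition+numberOfNer) in place, instead of A's full per-word re-scan with an if/else per token.
import Mathlib
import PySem

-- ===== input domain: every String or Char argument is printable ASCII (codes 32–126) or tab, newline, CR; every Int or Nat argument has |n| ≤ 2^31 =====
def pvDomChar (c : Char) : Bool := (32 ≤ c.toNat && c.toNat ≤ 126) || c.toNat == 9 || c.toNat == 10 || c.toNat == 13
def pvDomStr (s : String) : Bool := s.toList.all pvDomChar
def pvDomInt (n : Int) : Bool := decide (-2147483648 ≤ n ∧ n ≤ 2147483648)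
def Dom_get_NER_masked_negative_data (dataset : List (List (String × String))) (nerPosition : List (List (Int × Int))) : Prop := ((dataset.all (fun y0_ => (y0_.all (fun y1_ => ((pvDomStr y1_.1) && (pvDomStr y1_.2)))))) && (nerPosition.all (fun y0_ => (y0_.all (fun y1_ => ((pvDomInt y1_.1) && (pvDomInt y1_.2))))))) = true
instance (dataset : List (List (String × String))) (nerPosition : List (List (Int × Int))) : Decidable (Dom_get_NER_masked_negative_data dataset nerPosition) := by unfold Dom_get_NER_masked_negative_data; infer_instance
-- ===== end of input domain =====

-- B builds each sentence's token list once and overwrites only the clamped ner window per ner,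
-- instead of A's full per-word re-scan; same return value wherever A returns (Pre_: nerPosition
-- at least as long as dataset, else A raises IndexError and B truncates via zip).


-- ===== PORT A =====
def get_NER_masked_negative_data (dataset : List (List (String × String))) (nerPosition : List (List (Int × Int))) : List (List String × Int) :=
  (PySem.List.enumerate dataset).foldl (fun training_data p =>
    -- nerPosition[ind_d]; none (outside Pre_) read as [] to stay total
    let nerSent := (PySem.List.pyGet? nerPosition p.1).getD []
    nerSent.foldl (fun training_data ner =>
      let numberOfNer := ner.1
      let wordPosition := ner.2 + numberOfNer
      let complete_sentences := (PySem.List.enumerate p.2).foldl (fun cs q =>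
        if q.2.2 = "O" ∧ q.1 ≥ wordPosition ∧ q.1 < wordPosition + numberOfNer then
          cs ++ ["<MASK>"]
        else
          cs ++ [q.2.1]) []
      training_data ++ [(complete_sentences, (0 : Int))]) training_data) []

-- ===== PORT B =====
def get_NER_masked_negative_data_alt (dataset : List (List (String × String))) (nerPosition : List (List (Int × Int))) : List (List String × Int) :=
  (dataset.zip nerPosition).foldl (fun training_data dn =>
    let data := dn.1
    let words := data.map Prod.fst
    dn.2.foldl (fun training_data ner =>
      let wordPosition := ner.2 + ner.1
      let sent := (PySem.List.pyRange (max wordPosition 0) (min (wordPosition + ner.1) (data.length : Int)) 1).foldl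
        (fun sent i =>
          -- data[i][1]: i is in range here, default never read
          if (PySem.List.pyGetD data i ("", "")).2 = "O" then PySem.List.pySetD sent i "<MASK>" else sent) words
      training_data ++ [(sent, (0 : Int))]) training_data) []

-- ===== PRECONDITION & SPEC =====
-- A indexes nerPosition[ind_d] for every sentence index, so it raises IndexError iff nerPosition is shorter than dataset.
def Pre_get_NER_masked_negative_data (dataset : List (List (String × String))) (nerPosition : List (List (Int × Int))) : Prop :=
  dataset.length ≤ nerPosition.length
instance (dataset : List (List (String × String))) (nerPosition : List (List (Int × Int))) : Decidable (Pre_get_NER_masked_negative_data dataset nerPosition) := by unfold Pre_get_NER_masked_negative_data; infer_instance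
def pvWitness_get_NER_masked_negative_data : (List (List (String × String))) × (List (List (Int × Int))) :=
  ([[("a", "O"), ("b", "B")]], [[(1, 0)], [(2, 1)]])

def Spec_get_NER_masked_negative_data (dataset : List (List (String × String))) (nerPosition : List (List (Int × Int))) (out : List (List String × Int)) : Prop := out = get_NER_masked_negative_data_alt dataset nerPosition
instance (dataset : List (List (String × String))) (nerPosition : List (List (Int × Int))) (out : List (List String × Int)) : Decidable (Spec_get_NER_masked_negative_data dataset nerPosition out) := by unfold Spec_get_NER_masked_negative_data; infer_instance

-- ===== CLAIM (what is proved, stated in full; the proofs are below) =====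
def Claim_equal_get_NER_masked_negative_data : Prop := ∀ (dataset : List (List (String × String))) (nerPosition : List (List (Int × Int))), Dom_get_NER_masked_negative_data dataset nerPosition → Pre_get_NER_masked_negative_data dataset nerPosition → Spec_get_NER_masked_negative_data dataset nerPosition (get_NER_masked_negative_data dataset nerPosition)
-- ===== LEMMAS AND PROOFS =====

-- A's outer-loop body, as a function of the full nerPosition list (proof-side restatement of port A)
def pvBodyA (ns : List (List (Int × Int))) (training_data : List (List String × Int)) (p : Int × List (String × String)) : List (List String × Int) :=
  ((PySem.List.pyGet? ns p.1).getD []).foldl (fun training_data ner =>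
    training_data ++ [((PySem.List.enumerate p.2).foldl (fun cs q =>
      if q.2.2 = "O" ∧ q.1 ≥ ner.2 + ner.1 ∧ q.1 < ner.2 + ner.1 + ner.1 then cs ++ ["<MASK>"] else cs ++ [q.2.1]) [], (0 : Int))]) training_data

-- B's outer-loop body (proof-side restatement of port B)
def pvBodyB (training_data : List (List String × Int)) (dn : List (String × String) × List (Int × Int)) : List (List String × Int) :=
  dn.2.foldl (fun training_data ner =>
    training_data ++ [((PySem.List.pyRange (max (ner.2 + ner.1) 0) (min (ner.2 + ner.1 + ner.1) (dn.1.length : Int))).foldl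
      (fun sent i => if (PySem.List.pyGetD dn.1 i ("", "")).2 = "O" then PySem.List.pySetD sent i "<MASK>" else sent)
      (dn.1.map Prod.fst), (0 : Int))]) training_data

lemma pvA_eq_foldl (ds : List (List (String × String))) (ns : List (List (Int × Int))) :
    get_NER_masked_negative_data ds ns = (PySem.List.enumerate ds).foldl (pvBodyA ns) [] := rfl

lemma pvB_eq_foldl (ds : List (List (String × String))) (ns : List (List (Int × Int))) :
    get_NER_masked_negative_data_alt ds ns = (ds.zip ns).foldl pvBodyB [] := rfl

-- element-wise characterisation of the masking fold over a half-open index window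
lemma pvMaskFold_getElem? (data : List (String × String)) :
    ∀ (k : Nat) (lo hi : Int) (init : List String), 0 ≤ lo → hi - lo ≤ (k : Int) → hi ≤ (init.length : Int) → ∀ j : Nat,
    ((PySem.List.pyRange lo hi).foldl (fun sent i => if (PySem.List.pyGetD data i ("", "")).2 = "O" then PySem.List.pySetD sent i "<MASK>" else sent) init)[j]? =
      if lo ≤ (j : Int) ∧ (j : Int) < hi ∧ (PySem.List.pyGetD data (j : Int) ("", "")).2 = "O" then some "<MASK>" else init[j]? := by
  intro k
  induction k with
  | zero =>
    intro lo hi init h0 hk hlen j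
    rw [PySem.List.pyRange_one_eq_nil (by omega)]
    simp only [List.foldl_nil]
    rw [if_neg (by rintro ⟨h1, h2, -⟩; omega)]
  | succ k ih =>
    intro lo hi init h0 hk hlen j
    by_cases hlt : lo < hi
    · rw [PySem.List.pyRange_one_cons hlt]
      simp only [List.foldl_cons]
      rw [ih (lo + 1) hi _ (by omega) (by omega)
          (by split
              · rw [PySem.List.length_pySetD]; exact hlen
              · exact hlen) j]
      by_cases hj : (j : Int) = lo
      · subst hj
        by_cases htag : (PySem.List.pyGetD data (j : Int) ("", "")).2 = "O"
        · rw [if_neg (by omega), if_pos htag, if_pos ⟨by omega, by omega, htag⟩,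
              PySem.List.pySetD_of_nonneg _ _ h0, Int.toNat_natCast, List.getElem?_set,
              if_pos rfl, if_pos (by omega)]
        · rw [if_neg (by rintro ⟨h1, -, -⟩; omega), if_neg htag, if_neg (by rintro ⟨-, -, h⟩; exact htag h)]
      · have hset : (if (PySem.List.pyGetD data lo ("", "")).2 = "O" then PySem.List.pySetD init lo "<MASK>" else init)[j]? = init[j]? := by
          split
          · rw [PySem.List.pySetD_of_nonneg _ _ h0, List.getElem?_set, if_neg (by omega)]
          · rfl
        rw [hset]
        split_ifs with h1 h2 h2
        · rfl
        · exact absurd ⟨by omega, h1.2.1, h1.2.2⟩ h2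
        · exact absurd ⟨by omega, h2.2.1, h2.2.2⟩ h1
        · rfl
    · rw [PySem.List.pyRange_one_eq_nil (by omega)]
      simp only [List.foldl_nil]
      rw [if_neg (by rintro ⟨h1, h2, -⟩; omega)]

-- per-ner sentence equality: A's full rescan equals B's copy-and-window-overwrite
lemma pvSent_eq (data : List (String × String)) (wp n : Int) :
    ((PySem.List.pyRange (max wp 0) (min (wp + n) (data.length : Int))).foldl
      (fun sent i => if (PySem.List.pyGetD data i ("", "")).2 = "O" then PySem.List.pySetD sent i "<MASK>" else sent)
      (data.map Prod.fst))
    = (PySem.List.enumerate data).foldl (fun cs q =>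
        if q.2.2 = "O" ∧ q.1 ≥ wp ∧ q.1 < wp + n then cs ++ ["<MASK>"] else cs ++ [q.2.1]) [] := by
  have hbody : (fun (cs : List String) (q : Int × String × String) =>
      if q.2.2 = "O" ∧ q.1 ≥ wp ∧ q.1 < wp + n then cs ++ ["<MASK>"] else cs ++ [q.2.1])
      = fun cs q => cs ++ [if q.2.2 = "O" ∧ q.1 ≥ wp ∧ q.1 < wp + n then "<MASK>" else q.2.1] := by
    funext cs q; split <;> rfl
  rw [hbody, PySem.List.foldl_append_singleton_eq_map, List.nil_append]
  apply List.ext_getElem?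
  intro j
  rw [pvMaskFold_getElem? data (min (wp + n) (data.length : Int) - max wp 0).toNat (max wp 0)
      (min (wp + n) (data.length : Int)) _ (by omega) (by omega) (by rw [List.length_map]; omega) j]
  rw [List.getElem?_map, List.getElem?_map, PySem.List.getElem?_enumerate]
  cases hj : data[j]? with
  | none =>
    have hlen : ¬ j < data.length := by simpa [List.getElem?_eq_none_iff] using hj
    rw [if_neg (by rintro ⟨-, h2, -⟩; omega)]
    rfl
  | some w =>
    have hjl : j < data.length := (List.getElem?_eq_some_iff.mp hj).1
    have hget : PySem.List.pyGetD data (j : Int) ("", "") = w := by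
      rw [PySem.List.pyGetD_of_nonneg _ _ (by omega), Int.toNat_natCast, List.getD_eq_getElem?_getD, hj]
      rfl
    rw [hget]
    simp only [Option.map_some, zero_add]
    by_cases hO : w.2 = "O"
    · split_ifs with h1 h2 h2
      · rfl
      · exact absurd ⟨hO, by omega, by omega⟩ h2
      · exact absurd ⟨by omega, by omega, hO⟩ h1
      · rfl
    · rw [if_neg (by rintro ⟨-, -, h⟩; exact hO h), if_neg (by rintro ⟨h, -, -⟩; exact hO h)]

-- shifting the enumerate start by one and dropping the consumed head of nerPosition commute
lemma pvShift (ds : List (List (String × String))) :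
    ∀ (m : List (Int × Int)) (ns : List (List (Int × Int))) (acc : List (List String × Int)) (s : Nat),
    (PySem.List.enumerate ds ((s : Int) + 1)).foldl (pvBodyA (m :: ns)) acc
      = (PySem.List.enumerate ds (s : Int)).foldl (pvBodyA ns) acc := by
  induction ds with
  | nil => intro m ns acc s; rfl
  | cons d ds ih =>
    intro m ns acc s
    rw [PySem.List.enumerate_cons, PySem.List.enumerate_cons, List.foldl_cons, List.foldl_cons]
    have hcast : (s : Int) + 1 = ((s + 1 : Nat) : Int) := by push_cast; ring
    have hget : PySem.List.pyGet? (m :: ns) ((s : Int) + 1) = PySem.List.pyGet? ns (s : Int) := by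
      rw [hcast, PySem.List.pyGet?_natCast, PySem.List.pyGet?_natCast, List.getElem?_cons_succ]
    have hbody : pvBodyA (m :: ns) acc ((s : Int) + 1, d) = pvBodyA ns acc ((s : Int), d) := by
      simp only [pvBodyA, hget]
    rw [hbody, hcast, ih m ns _ (s + 1)]

-- the per-sentence bodies agree once the sentences agree
lemma pvBody_eq (d : List (String × String)) (n : List (Int × Int)) (ns : List (List (Int × Int))) (acc : List (List String × Int)) :
    pvBodyA (n :: ns) acc (0, d) = pvBodyB acc (d, n) := by
  simp only [pvBodyA, pvBodyB]
  have hget : PySem.List.pyGet? (n :: ns) (0 : Int) = some n := by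
    have h0 : (0 : Int) = ((0 : Nat) : Int) := rfl
    rw [h0, PySem.List.pyGet?_natCast]; rfl
  rw [hget]
  simp only [Option.getD_some]
  rw [PySem.List.foldl_append_singleton_eq_map (fun (ner : Int × Int) => ((PySem.List.enumerate d).foldl (fun cs q =>
        if q.2.2 = "O" ∧ q.1 ≥ ner.2 + ner.1 ∧ q.1 < ner.2 + ner.1 + ner.1 then cs ++ ["<MASK>"] else cs ++ [q.2.1]) [], (0 : Int))),
      PySem.List.foldl_append_singleton_eq_map (fun (ner : Int × Int) => ((PySem.List.pyRange (max (ner.2 + ner.1) 0) (min (ner.2 + ner.1 + ner.1) ((d.length : Int)))).foldl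
        (fun sent i => if (PySem.List.pyGetD d i ("", "")).2 = "O" then PySem.List.pySetD sent i "<MASK>" else sent) (d.map Prod.fst), (0 : Int)))]
  congr 1
  apply List.map_congr_left
  intro ner _
  rw [pvSent_eq d (ner.2 + ner.1) ner.1]

lemma pvMain (ds : List (List (String × String))) :
    ∀ (ns : List (List (Int × Int))) (acc : List (List String × Int)), ds.length ≤ ns.length →
    (PySem.List.enumerate ds).foldl (pvBodyA ns) acc = (ds.zip ns).foldl pvBodyB acc := by
  induction ds with
  | nil => intro ns acc _; rfl
  | cons d ds ih =>
    intro ns acc hlen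
    cases ns with
    | nil => simp at hlen
    | cons n ns =>
      show (PySem.List.enumerate (d :: ds) 0).foldl (pvBodyA (n :: ns)) acc = _
      rw [PySem.List.enumerate_cons, List.zip_cons_cons, List.foldl_cons, List.foldl_cons]
      rw [pvBody_eq d n ns acc]
      have h01 : (0 : Int) + 1 = ((0 : Nat) : Int) + 1 := rfl
      rw [h01, pvShift ds n ns _ 0]
      exact ih ns _ (by simpa using Nat.le_of_succ_le_succ hlen)

-- ===== VERDICT (by name: the statement is the Claim_ definition above) =====
theorem get_NER_masked_negative_data_spec : Claim_equal_get_NER_masked_negative_data := by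
  intro ds ns _ hpre
  unfold Spec_get_NER_masked_negative_data
  rw [pvA_eq_foldl, pvB_eq_foldl]
  exact pvMain ds ns [] hpre
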